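-- pv_equiv track=rewrite | github.com/veryshyjelly/cp_x | cp_python/src/1593-b-make-it-divisible-by-25.py | find_subseq
-- ===== SOURCE A (Python) =====
-- def find_subseq(n: str, s: str) -> int:
--     r = 0
--     n = n[::-1]
--     for c in s[::-1]:
--         while n and n[0] != c:
--             n = n[1:]
--             r += 1
--         if not n:
--             return r * 10
--         n = n[1:]
--     return r
-- ===== SOURCE B (Python) =====
-- def find_subseq(n: str, s: str) -> int:
--     boundary = len(n)
--     j = 0
--     for c in reversed(s):
--         p = n.rfind(c, 0, boundary)
--         if p == -1:
--             return (len(n) - j) * 10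
--         boundary = p
--         j += 1
--     return len(n) - boundary - len(s)
-- ===== Notes on version B (the rewrite author's own statement) =====
-- stated objective: faster
-- what changed: Replaces A's character-by-character skip-and-slice scan (each skip creates a new string via n[1:]) with a direct bounded str.rfind jump per pattern character, deriving the deletion count from matched positions by index arithmetic.
import Mathlib
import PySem

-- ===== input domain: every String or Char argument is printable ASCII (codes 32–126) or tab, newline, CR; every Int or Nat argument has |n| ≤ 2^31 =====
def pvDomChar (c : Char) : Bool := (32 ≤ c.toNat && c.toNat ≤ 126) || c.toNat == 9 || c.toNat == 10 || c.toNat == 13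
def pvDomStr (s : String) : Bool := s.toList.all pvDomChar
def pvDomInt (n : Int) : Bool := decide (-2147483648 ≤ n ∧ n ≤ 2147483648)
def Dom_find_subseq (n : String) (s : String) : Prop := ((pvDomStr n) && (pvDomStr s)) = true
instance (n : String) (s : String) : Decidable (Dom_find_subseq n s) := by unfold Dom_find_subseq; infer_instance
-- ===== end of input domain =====

-- B replaces A's per-character skip-and-slice scan with bounded str.rfind jumps and index
-- arithmetic (fewer allocations, C-level scans); return values proved equal on all inputs.


-- ===== PORT A =====
-- the `while n and n[0] != c: n = n[1:]; r += 1` loop: returns the remaining list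
-- (head = c, or []) and the number of characters skipped
def skipUntil (rn : List Char) (c : Char) : List Char × Int :=
  match rn with
  | [] => ([], 0)
  | x :: xs =>
    if x ≠ c then
      let (l, k) := skipUntil xs c
      (l, k + 1)
    else (x :: xs, 0)

-- the `for c in s[::-1]` loop over the already-reversed n, accumulating r
def aLoop (rn : List Char) (sc : List Char) (r : Int) : Int :=
  match sc with
  | [] => r
  | c :: cs =>
    match skipUntil rn c with
    | ([], k) => (r + k) * 10                 -- `if not n: return r * 10`
    | (_ :: rest, k) => aLoop rest cs (r + k) -- `n = n[1:]`

-- n[::-1] / s[::-1] on strings = reversal of the character list (exact)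
def find_subseq (n : String) (s : String) : Int :=
  aLoop n.toList.reverse s.toList.reverse 0

-- ===== PORT B =====
-- the `for c in reversed(s)` loop of Source B; boundary and j as in the Python
def bLoop (n : String) (s : String) (sc : List Char) (boundary : Int) (j : Int) : Int :=
  match sc with
  | c :: cs =>
    let p := PySem.Str.rfindFrom n (String.ofList [c]) 0 (some boundary)  -- n.rfind(c, 0, boundary)
    if p = -1 then ((PySem.Str.len n : Int) - j) * 10
    else bLoop n s cs p (j + 1)
  | [] => (PySem.Str.len n : Int) - boundary - (PySem.Str.len s : Int)

def find_subseq_alt (n : String) (s : String) : Int :=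
  bLoop n s s.toList.reverse (PySem.Str.len n) 0

-- ===== PRECONDITION & SPEC =====
def Spec_find_subseq (n : String) (s : String) (out : Int) : Prop := out = find_subseq_alt n s
instance (n : String) (s : String) (out : Int) : Decidable (Spec_find_subseq n s out) := by unfold Spec_find_subseq; infer_instance

-- ===== CLAIM (what is proved, stated in full; the proofs are below) =====
def Claim_equal_find_subseq : Prop := ∀ (n : String) (s : String), Dom_find_subseq n s → Spec_find_subseq n s (find_subseq n s)

-- ===== LEMMAS AND PROOFS =====

-- index of the LAST occurrence of c in l (proof-side characterisation of rfind)
def lastIdx : List Char → Char → Option Nat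
  | [], _ => none
  | x :: xs, c =>
    match lastIdx xs c with
    | some i => some (i + 1)
    | none => if x = c then some 0 else none

theorem lastIdx_append_singleton (t : List Char) (x c : Char) :
    lastIdx (t ++ [x]) c = if x = c then some t.length else lastIdx t c := by
  induction t with
  | nil => simp [lastIdx]
  | cons y ys ih =>
    simp only [List.cons_append, lastIdx, ih]
    by_cases hx : x = c <;> cases hy : lastIdx ys c <;> simp [hx, hy] <;> split <;> simp

theorem lastIdx_none_not_mem {l : List Char} {c : Char} (h : lastIdx l c = none) : c ∉ l := by
  induction l with
  | nil => simp
  | cons x xs ih =>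
    simp only [lastIdx] at h
    cases hy : lastIdx xs c with
    | some i => simp [hy] at h
    | none =>
      simp only [hy] at h
      split at h
      · exact absurd h (by simp)
      · simp only [List.mem_cons]
        rintro (rfl | hm)
        · simp_all
        · exact ih hy hm

theorem lastIdx_some_decomp {l : List Char} {c : Char} {p : Nat} (h : lastIdx l c = some p) :
    ∃ t u, l = t ++ c :: u ∧ t.length = p ∧ c ∉ u := by
  induction l generalizing p with
  | nil => simp [lastIdx] at h
  | cons x xs ih =>
    simp only [lastIdx] at h
    cases hy : lastIdx xs c with
    | some i =>
      simp only [hy] at h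
      obtain rfl : i + 1 = p := by simpa using h
      obtain ⟨t, u, rfl, rfl, hu⟩ := ih hy
      exact ⟨x :: t, u, rfl, by simp, hu⟩
    | none =>
      simp only [hy] at h
      split at h
      · rename_i hx
        obtain rfl : (0 : Nat) = p := by simpa using h
        exact ⟨[], xs, by simp [hx], rfl, lastIdx_none_not_mem hy⟩
      · simp at h

theorem skipUntil_not_mem {c : Char} : ∀ {m : List Char}, c ∉ m → skipUntil m c = ([], (m.length : Int))
  | [], _ => by simp [skipUntil]
  | x :: xs, h => by
    have hx : x ≠ c := fun hc => h (by simp [hc])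
    have hxs : c ∉ xs := fun hm => h (by simp [hm])
    simp [skipUntil, hx, Ne.symm hx, skipUntil_not_mem hxs]

theorem skipUntil_mem {c : Char} (t : List Char) :
    ∀ {u : List Char}, c ∉ u → skipUntil (u ++ c :: t) c = (c :: t, (u.length : Int))
  | [], _ => by simp [skipUntil]
  | x :: xs, h => by
    have hx : x ≠ c := fun hc => h (by simp [hc])
    have hxs : c ∉ xs := fun hm => h (by simp [hm])
    simp [skipUntil, hx, Ne.symm hx, skipUntil_mem t hxs]

-- PySem.Chars.rfind.go counts its index DOWN; it computes the last occurrence index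
theorem rfind_go_eq_lastIdx (l : List Char) (c : Char) :
    ∀ j : Nat, PySem.Chars.rfind.go l [c] j =
      (match lastIdx (l.take (j + 1)) c with
       | some p => (p : Int)
       | none => -1)
  | 0 => by
    cases l with
    | nil => simp [PySem.Chars.rfind.go, lastIdx, List.isPrefixOf]
    | cons x xs =>
      by_cases hx : x = c
      · simp [PySem.Chars.rfind.go, lastIdx, List.isPrefixOf, hx]
      · simp [PySem.Chars.rfind.go, lastIdx, List.isPrefixOf, hx, Ne.symm hx]
  | (j + 1) => by
    have ih := rfind_go_eq_lastIdx l c j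
    by_cases hlt : j + 1 < l.length
    · have hget : l.drop (j + 1) = l[j + 1] :: l.drop (j + 2) := List.drop_eq_getElem_cons hlt
      have htake : l.take (j + 2) = l.take (j + 1) ++ [l[j + 1]] := by
        rw [← List.take_concat_get' l (j + 1) hlt]
      by_cases hx : l[j + 1] = c
      · simp [PySem.Chars.rfind.go, hget, List.isPrefixOf, hx, beq_iff_eq, htake,
          lastIdx_append_singleton, List.length_take, Nat.min_eq_left (Nat.le_of_lt hlt)]
      · simp only [PySem.Chars.rfind.go, hget, htake, lastIdx_append_singleton]
        simp [List.isPrefixOf, hx, Ne.symm hx, beq_iff_eq, ih]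
    · have hdrop : l.drop (j + 1) = [] := List.drop_eq_nil_of_le (by omega)
      have htake : l.take (j + 2) = l.take (j + 1) := by
        rw [List.take_of_length_le (by omega), List.take_of_length_le (by omega)]
      simp [PySem.Chars.rfind.go, hdrop, List.isPrefixOf, htake, ih]

theorem rfindFrom_eq_lastIdx (l : List Char) (c : Char) (b : Nat) (hb : b ≤ l.length) :
    PySem.Chars.rfindFrom l [c] 0 (some (b : Int)) =
      (match lastIdx (l.take b) c with
       | some p => (p : Int)
       | none => -1) := by
  have h1 : ¬ ((l.length : Int) < (b : Int)) := by exact_mod_cast not_lt.mpr hb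
  have h2 : ¬ ((b : Int) < 0) := by omega
  simp only [PySem.Chars.rfindFrom, h1, h2, if_false, lt_self_iff_false]
  have h4 : ((b : Int)).toNat = b := Int.toNat_natCast b
  simp only [h4, Int.toNat_zero, List.drop_zero, zero_add]
  rw [PySem.Chars.rfind]
  rw [rfind_go_eq_lastIdx]
  have hlen : (l.take b).length = b := List.length_take_of_le hb
  have htt : (l.take b).take (b + 1) = l.take b := List.take_of_length_le (by omega)
  rw [hlen, htt]
  cases hm : lastIdx (l.take b) c with
  | none => simp
  | some p => simp

theorem main_loop (n s : String) :
    ∀ (sc : List Char) (boundary j : Nat), boundary ≤ n.toList.length →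
      j + sc.length = s.toList.length →
      aLoop ((n.toList.take boundary).reverse) sc ((n.toList.length : Int) - boundary - j)
        = bLoop n s sc (boundary : Int) (j : Int) := by
  intro sc
  induction sc with
  | nil =>
    intro boundary j hb hj
    simp only [aLoop, bLoop, PySem.Str.len, String.length]
    have : (s.toList.length : Int) = (j : Int) := by
      simp at hj; exact_mod_cast hj.symm
    rw [this]
  | cons c cs ih =>
    intro boundary j hb hj
    have hrf : PySem.Str.rfindFrom n (String.ofList [c]) 0 (some (boundary : Int)) =
        (match lastIdx (n.toList.take boundary) c with
         | some p => (p : Int)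
         | none => -1) := by
      rw [PySem.Str.rfindFrom_eq]
      rw [String.toList_ofList]
      exact rfindFrom_eq_lastIdx n.toList c boundary hb
    cases hm : lastIdx (n.toList.take boundary) c with
    | none =>
      have hnm : c ∉ (n.toList.take boundary).reverse := by
        simpa using lastIdx_none_not_mem hm
      have hsk := skipUntil_not_mem hnm
      have hlen : (((n.toList.take boundary).reverse.length : Nat) : Int) = (boundary : Int) := by
        simp [List.length_take_of_le hb]
      simp only [bLoop, hrf, hm, aLoop, hsk, hlen, reduceIte, PySem.Str.len, String.length]
      ring
    | some p =>
      obtain ⟨t, u, hdec, hlt, hu⟩ := lastIdx_some_decomp hm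
      have hplen : p + 1 + u.length = (n.toList.take boundary).length := by
        rw [hdec]; simp [hlt]; omega
      have hblen : (n.toList.take boundary).length = boundary := List.length_take_of_le hb
      have hrev : (n.toList.take boundary).reverse = u.reverse ++ c :: t.reverse := by
        rw [hdec]; simp
      have hnu : c ∉ u.reverse := by simpa using hu
      have hsk := skipUntil_mem (c := c) t.reverse hnu
      have ht : t = n.toList.take p := by
        have h1 : (n.toList.take boundary).take p = t := by
          rw [hdec, ← hlt, List.take_left]
        rw [← h1, List.take_take]
        congr 1
        omega
      have hp1 : p < boundary := by omega
      have hne : ¬ ((p : Int) = -1) := by omega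
      have harith : (n.toList.length : Int) - boundary - j + ((u.reverse.length : Nat) : Int)
          = (n.toList.length : Int) - p - ((j : Int) + 1) := by
        have h2 : (u.length : Int) = (boundary : Int) - p - 1 := by
          have h3 := hplen; rw [hblen] at h3; push_cast; omega
        simp only [List.length_reverse, h2]; ring
      simp only [bLoop, hrf, hm, if_neg hne, aLoop, hrev, hsk]
      rw [harith, ht]
      rw [show ((j : Int) + 1) = ((j + 1 : Nat) : Int) by push_cast; ring]
      exact ih p (j + 1) (le_trans (le_of_lt hp1) hb) (by simp at hj ⊢; omega)

-- ===== VERDICT (by name: the statement is the Claim_ definition above) =====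
theorem find_subseq_spec : Claim_equal_find_subseq := by
  intro n s _
  unfold Spec_find_subseq find_subseq find_subseq_alt
  have h := main_loop n s s.toList.reverse n.toList.length 0 le_rfl (by simp)
  have hl : n.toList.length = PySem.Str.len n := by simp [PySem.Str.len]
  rw [List.take_length, hl] at h
  simpa using h
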